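-- pv_equiv track=rewrite | github.com/zastrowm/docs | build-py-docs.py | find_container_modules
-- ===== SOURCE A (Python) =====
-- def find_container_modules(modules: list[str], main_module: str) -> list[str]:
--     """Find intermediate namespace modules that have multiple children"""
--     containers = set()
--     for module in modules:
--         parts = module.split('.')
--         if len(parts) > 2:
--             for i in range(2, len(parts)):
--                 container = '.'.join(parts[:i + 1])
--                 if container != main_module and container not in modules:
--                     children = [m for m in modules if m.startswith(container + '.')]
--                     if len(children) > 1:
--                         containers.add(container)
--     return sorted(containers)
-- ===== SOURCE B (Python) =====
-- def find_container_modules(modules: list[str], main_module: str) -> list[str]: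
--     """Find intermediate namespace modules that have multiple children.
--
--     One pass over the modules builds (a) a dict counting, for every proper
--     dotted prefix, how many modules live strictly below it, and (b) the set
--     of candidate prefixes having at least three parts; a single filter over
--     the candidates then picks the containers.
--     """
--     child_count = {}
--     candidates = set()
--     for m in modules:
--         parts = m.split('.')
--         for k in range(1, len(parts)):
--             p = '.'.join(parts[:k])
--             child_count[p] = child_count.get(p, 0) + 1
--         for k in range(3, len(parts) + 1):
--             candidates.add('.'.join(parts[:k]))
--     present = set(modules)
--     return sorted(p for p in candidates
--                   if p != main_module and p not in present and child_count.get(p, 0) > 1)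
-- ===== Notes on version B (the rewrite author's own statement) =====
-- stated objective: alternative
-- what changed: Instead of rescanning the whole module list for the children of every prefix of every module, B makes one pass that counts descendants per dotted prefix in a dict and collects candidate prefixes in a set, then filters the candidates once.
import Mathlib
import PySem

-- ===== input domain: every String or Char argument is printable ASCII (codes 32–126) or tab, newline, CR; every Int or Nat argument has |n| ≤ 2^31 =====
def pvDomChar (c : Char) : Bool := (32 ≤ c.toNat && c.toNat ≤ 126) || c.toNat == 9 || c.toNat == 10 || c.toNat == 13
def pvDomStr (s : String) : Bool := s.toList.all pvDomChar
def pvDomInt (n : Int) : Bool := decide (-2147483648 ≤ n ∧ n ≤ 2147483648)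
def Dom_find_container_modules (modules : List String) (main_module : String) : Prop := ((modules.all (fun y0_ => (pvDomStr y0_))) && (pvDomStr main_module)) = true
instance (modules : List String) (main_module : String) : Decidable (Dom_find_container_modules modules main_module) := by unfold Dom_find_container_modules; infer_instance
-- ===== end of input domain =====

-- B replaces A's repeated scans of the whole module list (one scan per prefix of every
-- module) with one pass that counts descendants per dotted prefix in a dict and collects
-- candidate prefixes in a set, then filters the candidates once (objective: alternative).

-- ===== PORT A =====
def find_container_modules (modules : List String) (main_module : String) : List String :=
  let containers : PySem.Set String :=
    modules.foldl (fun containers module_ =>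
      let parts := (PySem.Str.split? module_ ".").getD []
      if parts.length > 2 then
        (PySem.List.pyRange 2 (parts.length : Int)).foldl (fun containers i =>
          let container := PySem.Str.join "." (PySem.List.slice parts none (some (i + 1)))
          if (container != main_module) && !(modules.contains container) then
            let children := modules.filter (fun m => PySem.Str.startswith m (container ++ "."))
            if children.length > 1 then containers.add container else containers
          else containers) containers
      else containers) PySem.Set.empty
  PySem.List.sorted containers (fun x => x)

-- ===== PORT B =====
def find_container_modules_alt (modules : List String) (main_module : String) : List String :=
  let st := modules.foldl (fun (st : PySem.Dict String Int × PySem.Set String) m =>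
      let parts := (PySem.Str.split? m ".").getD []
      ((PySem.List.pyRange 1 (parts.length : Int)).foldl (fun d k =>
          let p := PySem.Str.join "." (PySem.List.slice parts none (some k))
          d.insert p (d.getD p 0 + 1)) st.1,
       (PySem.List.pyRange 3 ((parts.length : Int) + 1)).foldl (fun c k =>
          c.add (PySem.Str.join "." (PySem.List.slice parts none (some k)))) st.2))
    (PySem.Dict.empty, PySem.Set.empty)
  let present := PySem.Set.ofList modules
  PySem.List.sorted (st.2.filter (fun p =>
    (p != main_module) && !(present.contains p) && (st.1.getD p 0 > 1))) (fun x => x)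

-- ===== PRECONDITION & SPEC =====
def Spec_find_container_modules (modules : List String) (main_module : String) (out : List String) : Prop := out = find_container_modules_alt modules main_module
instance (modules : List String) (main_module : String) (out : List String) : Decidable (Spec_find_container_modules modules main_module out) := by unfold Spec_find_container_modules; infer_instance

-- ===== CLAIM (what is proved, stated in full; the proofs are below) =====
def Claim_equal_find_container_modules : Prop := ∀ (modules : List String) (main_module : String), Dom_find_container_modules modules main_module → Spec_find_container_modules modules main_module (find_container_modules modules main_module)

-- ===== LEMMAS AND PROOFS =====

-- Shared spec-side vocabulary: a module's parts and its dotted prefixes.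
def pvParts (m : String) : List String := (PySem.Str.split? m ".").getD []
def pvPref (m : String) (k : Int) : String :=
  PySem.Str.join "." (PySem.List.slice (pvParts m) none (some k))
-- proper dotted prefixes (0 < k < number of parts) and candidate prefixes (≥ 3 parts)
def pvPrefL (m : String) : List String :=
  (PySem.List.pyRange 1 ((pvParts m).length : Int)).map (pvPref m)
def pvCand (m : String) : List String :=
  (PySem.List.pyRange 3 (((pvParts m).length : Int) + 1)).map (pvPref m)
-- A's acceptance test for a candidate container
def pvGood (modules : List String) (main_module : String) (p : String) : Bool :=
  ((p != main_module) && !(modules.contains p)) &&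
    ((modules.filter (fun m => PySem.Str.startswith m (p ++ "."))).length > 1)

-- PySem.Chars.splitOn with a single-character separator is Mathlib's List.splitOn.
lemma splitOn_go_spec (c : Char) : ∀ (fuel : Nat) (l cur : List Char) (acc : List (List Char)),
    l.length ≤ fuel →
    PySem.Chars.splitOn.go [c] fuel l cur acc
      = acc.reverse ++ (List.splitOn c l).modifyHead (cur.reverse ++ ·) := by
  intro fuel
  induction fuel with
  | zero =>
    intro l cur acc h
    have : l = [] := List.eq_nil_of_length_eq_zero (Nat.le_zero.1 h)
    subst this
    simp [PySem.Chars.splitOn.go, List.splitOn_nil]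
  | succ n ih =>
    intro l cur acc h
    cases l with
    | nil => simp [PySem.Chars.splitOn.go, List.splitOn_nil]
    | cons a rest =>
      by_cases hac : a = c
      · subst hac
        have hpre : List.isPrefixOf [a] (a :: rest) = true := by
          simp [List.isPrefixOf]
        rw [PySem.Chars.splitOn.go]
        simp only [hpre, if_true]
        rw [ih _ _ _ (by simpa using Nat.lt_succ_iff.1 (by simpa using h))]
        have : List.splitOn a (a :: rest) = [] :: List.splitOn a rest := by
          simp [List.splitOn, List.splitOnP_cons]
        rw [this]
        cases hx : List.splitOn a rest <;> simp [hx]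
      · have hpre : List.isPrefixOf [c] (a :: rest) = false := by
          simp [List.isPrefixOf]; exact fun h => absurd h.symm hac
        rw [PySem.Chars.splitOn.go]
        simp only [hpre, Bool.false_eq_true, if_false]
        rw [ih _ _ _ (by simpa using Nat.lt_succ_iff.1 (by simpa using h))]
        have hsp : List.splitOn c (a :: rest) = (List.splitOn c rest).modifyHead (a :: ·) := by
          simp [List.splitOn, List.splitOnP_cons, hac]
        rw [hsp]
        cases hx : List.splitOn c rest with
        | nil => exact absurd hx (List.splitOnP_ne_nil _ _)
        | cons y ys => simp

lemma chars_splitOn_eq (c : Char) (l : List Char) :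
    PySem.Chars.splitOn l [c] = List.splitOn c l := by
  rw [PySem.Chars.splitOn, splitOn_go_spec c (l.length + 1) l [] [] (by omega)]
  cases hx : List.splitOn c l with
  | nil => exact absurd hx (List.splitOnP_ne_nil _ _)
  | cons y ys => simp

lemma pvParts_toList (m : String) :
    (pvParts m).map String.toList = List.splitOn '.' m.toList := by
  have h := PySem.Str.split?_map m "."
  rw [PySem.Chars.split?] at h
  have hsep : (".".toList) = ['.'] := by decide
  rw [hsep] at h
  simp only [List.isEmpty_cons] at h
  rw [chars_splitOn_eq] at h
  unfold pvParts
  cases hs : PySem.Str.split? m "." with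
  | none => rw [hs] at h; simp at h
  | some L => rw [hs] at h; simpa using h

-- splitting at a separator occurrence splits the parts list
lemma splitOn_append (c : Char) (a b : List Char) :
    List.splitOn c (a ++ c :: b) = List.splitOn c a ++ List.splitOn c b := by
  induction a with
  | nil => simp [List.splitOn, List.splitOnP_cons]
  | cons x xs ih =>
    simp only [List.cons_append, List.splitOn, List.splitOnP_cons] at ih ⊢
    rw [ih]
    cases hx : List.splitOnP (fun b => b == c) xs with
    | nil => exact absurd hx (List.splitOnP_ne_nil _ _)
    | cons y ys => split_ifs <;> simp

lemma intercalate_append_of_ne_nil (sep : List Char) (xs ys : List (List Char))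
    (h : xs ≠ []) (h2 : ys ≠ []) :
    sep.intercalate (xs ++ ys) = sep.intercalate xs ++ sep ++ sep.intercalate ys := by
  induction xs with
  | nil => simp at h
  | cons x xt ih =>
    cases xt with
    | nil =>
      cases ys with
      | nil => simp at h2
      | cons y yt => simp [List.intercalate, List.intersperse_cons₂]
    | cons x2 xt2 =>
      simp only [List.cons_append, List.intercalate, List.intersperse_cons₂,
        List.flatten_cons, List.append_assoc] at ih ⊢
      rw [ih (by simp)]

lemma take_splitOn_ne_nil (mL : List Char) (k : Nat) (hk1 : 1 ≤ k) :
    (List.splitOn '.' mL).take k ≠ [] := by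
  have h1 := List.splitOnP_ne_nil (fun b => b == '.') mL
  obtain ⟨k', rfl⟩ : ∃ k', k = k' + 1 := ⟨k - 1, by omega⟩
  cases hx : List.splitOn '.' mL with
  | nil => exact absurd hx h1
  | cons y ys => simp

-- the key characterisation: "p ++ '.'" is a string prefix of m iff p is a proper
-- dotted prefix (a '.'-join of the first k parts, 0 < k < number of parts) of m
lemma key_iff (mL pL : List Char) :
    (pL ++ ['.'] <+: mL) ↔ ∃ k : Nat, 1 ≤ k ∧ k < (List.splitOn '.' mL).length ∧
      ['.'].intercalate ((List.splitOn '.' mL).take k) = pL := by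
  constructor
  · rintro ⟨t, ht⟩
    have hm : mL = pL ++ '.' :: t := by simpa using ht.symm
    subst hm
    rw [splitOn_append]
    refine ⟨(List.splitOn '.' pL).length, ?_, ?_, ?_⟩
    · have := List.splitOnP_ne_nil (fun b => b == '.') pL
      cases hx : List.splitOn '.' pL with
      | nil => exact absurd hx this
      | cons y ys => simp
    · have := List.splitOnP_ne_nil (fun b => b == '.') t
      have h2 : 1 ≤ (List.splitOn '.' t).length := by
        cases hx : List.splitOn '.' t with
        | nil => exact absurd hx this
        | cons y ys => simp
      simp only [List.length_append]
      omega
    · rw [List.take_left, List.intercalate_splitOn]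
  · rintro ⟨k, hk1, hk2, hk3⟩
    have hm : mL = ['.'].intercalate (List.splitOn '.' mL) := (List.intercalate_splitOn mL '.').symm
    have hsplit : List.splitOn '.' mL
        = (List.splitOn '.' mL).take k ++ (List.splitOn '.' mL).drop k :=
      (List.take_append_drop k _).symm
    have hne2 : (List.splitOn '.' mL).drop k ≠ [] := by
      intro hc
      have := congrArg List.length hc
      simp [List.length_drop] at this
      omega
    refine ⟨['.'].intercalate ((List.splitOn '.' mL).drop k), ?_⟩
    conv_rhs => rw [hm, hsplit]
    rw [intercalate_append_of_ne_nil _ _ _ (take_splitOn_ne_nil mL k hk1) hne2, hk3]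

-- lengths of the dotted prefixes grow strictly with k
lemma intercalate_take_length_lt (mL : List Char) (k k' : Nat)
    (h1 : 1 ≤ k) (h2 : k < k') (h3 : k' ≤ (List.splitOn '.' mL).length) :
    (['.'].intercalate ((List.splitOn '.' mL).take k)).length
      < (['.'].intercalate ((List.splitOn '.' mL).take k')).length := by
  have hsplit : (List.splitOn '.' mL).take k' =
      (List.splitOn '.' mL).take k ++ (((List.splitOn '.' mL).take k').drop k) := by
    conv_lhs => rw [← List.take_append_drop k ((List.splitOn '.' mL).take k')]
    rw [List.take_take, min_eq_left (le_of_lt h2)]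
  have hne2 : (((List.splitOn '.' mL).take k').drop k) ≠ [] := by
    intro hc
    have := congrArg List.length hc
    simp [List.length_drop, List.length_take] at this
    omega
  rw [hsplit, intercalate_append_of_ne_nil _ _ _ (take_splitOn_ne_nil mL k h1) hne2]
  simp

lemma pyRange_eq_range_map (a : Int) (n : Nat) :
    PySem.List.pyRange a (a + n) = (List.range n).map (fun (j : Nat) => a + (j : Int)) := by
  induction n generalizing a with
  | zero => simp [PySem.List.pyRange_one_eq_nil]
  | succ k ih =>
    rw [PySem.List.pyRange_one_cons (by omega)]
    rw [show (a + ((k + 1 : Nat) : Int)) = (a + 1) + (k : Nat) by push_cast; ring, ih (a + 1)]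
    rw [List.range_succ_eq_map]
    simp only [List.map_cons, List.map_map, Nat.cast_zero, add_zero]
    congr 1
    apply List.map_congr_left
    intro j _
    simp only [Function.comp_apply, Nat.succ_eq_add_one]
    push_cast
    ring

lemma pvParts_length (m : String) :
    (pvParts m).length = (List.splitOn '.' m.toList).length := by
  have := congrArg List.length (pvParts_toList m)
  simpa using this

lemma pvPref_toList (m : String) (k : Int) (hk : 0 ≤ k) :
    (pvPref m k).toList = ['.'].intercalate ((List.splitOn '.' m.toList).take k.toNat) := by
  unfold pvPref
  rw [PySem.List.slice_to _ hk, PySem.Str.toList_join, PySem.Chars.join]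
  rw [List.map_take, pvParts_toList]
  rw [show (".".toList) = ['.'] from by decide]

lemma startswith_dot_iff (m p : String) :
    PySem.Str.startswith m (p ++ ".") = true ↔ (p.toList ++ ['.'] <+: m.toList) := by
  rw [PySem.Str.startswith_eq, PySem.Chars.startswith_iff, String.toList_append]
  rw [show (".".toList) = ['.'] from by decide]

lemma mem_pvPrefL_iff (m p : String) :
    p ∈ pvPrefL m ↔ PySem.Str.startswith m (p ++ ".") = true := by
  rw [startswith_dot_iff, key_iff, pvPrefL, List.mem_map]
  constructor
  · rintro ⟨i, hi, rfl⟩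
    rw [PySem.List.mem_pyRange_one] at hi
    refine ⟨i.toNat, by omega, by rw [← pvParts_length]; omega, ?_⟩
    rw [pvPref_toList m i (by omega)]
  · rintro ⟨k, hk1, hk2, hk3⟩
    refine ⟨(k : Int), ?_, ?_⟩
    · rw [PySem.List.mem_pyRange_one, pvParts_length]; omega
    · rw [← String.toList_inj, pvPref_toList m k (by omega)]
      simpa using hk3

lemma nodup_pyRange_one (a b : Int) : (PySem.List.pyRange a b).Nodup := by
  by_cases hab : a < b
  · obtain ⟨n, hn⟩ : ∃ n : Nat, b = a + n := ⟨(b - a).toNat, by omega⟩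
    subst hn
    rw [pyRange_eq_range_map]
    apply List.Nodup.map_on _ (List.nodup_range)
    intro x _ y _ hxy
    omega
  · rw [PySem.List.pyRange_one_eq_nil (by omega)]
    exact List.nodup_nil

lemma pvPref_inj_on (m : String) (i j : Int) (h1 : 1 ≤ i) (h2 : i < j)
    (h3 : j ≤ ((pvParts m).length : Int)) : pvPref m i ≠ pvPref m j := by
  intro he
  have := congrArg (fun s => s.toList.length) he
  simp only [pvPref_toList m i (by omega), pvPref_toList m j (by omega)] at this
  have hlt := intercalate_take_length_lt m.toList i.toNat j.toNat
    (by omega) (by omega) (by rw [← pvParts_length]; omega)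
  omega

lemma pvPrefL_nodup (m : String) : (pvPrefL m).Nodup := by
  unfold pvPrefL
  apply List.Nodup.map_on _ (nodup_pyRange_one _ _)
  intro x hx y hy hxy
  rw [PySem.List.mem_pyRange_one] at hx hy
  by_contra hne
  rcases Int.lt_or_lt_of_ne hne with h | h
  · exact pvPref_inj_on m x y (by omega) h (by omega) hxy
  · exact pvPref_inj_on m y x (by omega) h (by omega) hxy.symm

-- each module contributes its prefix p exactly once iff it starts with "p."
lemma pvPrefL_count (m p : String) :
    (pvPrefL m).count p = if PySem.Str.startswith m (p ++ ".") = true then 1 else 0 := by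
  by_cases h : p ∈ pvPrefL m
  · rw [List.count_eq_one_of_mem (pvPrefL_nodup m) h, if_pos ((mem_pvPrefL_iff m p).1 h)]
  · rw [List.count_eq_zero_of_not_mem h, if_neg (fun hc => h ((mem_pvPrefL_iff m p).2 hc))]

-- so B's per-prefix tally equals A's children count
lemma count_flatMap_prefL (modules : List String) (p : String) :
    (modules.flatMap pvPrefL).count p
      = (modules.filter (fun m => PySem.Str.startswith m (p ++ "."))).length := by
  induction modules with
  | nil => rfl
  | cons m ms ih =>
    rw [List.flatMap_cons, List.count_append, ih, pvPrefL_count, List.filter_cons]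
    split_ifs <;> simp [Nat.add_comm]

-- A's and B's candidate enumerations produce the same prefixes
lemma mem_candA_iff (m x : String) :
    (x ∈ (PySem.List.pyRange 2 ((pvParts m).length : Int)).map (fun i => pvPref m (i + 1)))
      ↔ x ∈ pvCand m := by
  unfold pvCand
  rw [List.mem_map, List.mem_map]
  constructor
  · rintro ⟨i, hi, rfl⟩
    rw [PySem.List.mem_pyRange_one] at hi
    exact ⟨i + 1, PySem.List.mem_pyRange_one.2 (by omega), rfl⟩
  · rintro ⟨k, hk, rfl⟩
    rw [PySem.List.mem_pyRange_one] at hk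
    exact ⟨k - 1, PySem.List.mem_pyRange_one.2 (by omega), by norm_num⟩

-- the guarded Set.add loop of A: membership and nodup
lemma mem_foldl_guard_add {α : Type} [BEq α] [LawfulBEq α] (g1 g2 : α → Bool)
    (l : List α) (s : PySem.Set α) (x : α) :
    (x ∈ l.foldl (fun s y => if g1 y then (if g2 y then PySem.Set.add s y else s) else s) s
      ↔ x ∈ s ∨ (x ∈ l ∧ g1 x = true ∧ g2 x = true)) := by
  induction l generalizing s with
  | nil => simp
  | cons y t ih =>
    rw [List.foldl_cons]
    by_cases h1 : g1 y = true <;> by_cases h2 : g2 y = true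
    · rw [if_pos h1, if_pos h2, ih, PySem.Set.mem_add]
      constructor
      · rintro ((hx | rfl) | ⟨hm, hg⟩)
        · exact Or.inl hx
        · exact Or.inr ⟨List.mem_cons_self, h1, h2⟩
        · exact Or.inr ⟨List.mem_cons_of_mem _ hm, hg⟩
      · rintro (hx | ⟨hm, hg1, hg2⟩)
        · exact Or.inl (Or.inl hx)
        · rcases List.mem_cons.1 hm with rfl | hm
          · exact Or.inl (Or.inr rfl)
          · exact Or.inr ⟨hm, hg1, hg2⟩
    · rw [if_pos h1, if_neg h2, ih]
      constructor
      · rintro (hx | ⟨hm, hg⟩)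
        · exact Or.inl hx
        · exact Or.inr ⟨List.mem_cons_of_mem _ hm, hg⟩
      · rintro (hx | ⟨hm, hg1, hg2⟩)
        · exact Or.inl hx
        · rcases List.mem_cons.1 hm with rfl | hm
          · exact absurd hg2 h2
          · exact Or.inr ⟨hm, hg1, hg2⟩
    · rw [if_neg h1, ih]
      constructor
      · rintro (hx | ⟨hm, hg⟩)
        · exact Or.inl hx
        · exact Or.inr ⟨List.mem_cons_of_mem _ hm, hg⟩
      · rintro (hx | ⟨hm, hg1, hg2⟩)
        · exact Or.inl hx
        · rcases List.mem_cons.1 hm with rfl | hm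
          · exact absurd hg1 h1
          · exact Or.inr ⟨hm, hg1, hg2⟩
    · rw [if_neg h1, ih]
      constructor
      · rintro (hx | ⟨hm, hg⟩)
        · exact Or.inl hx
        · exact Or.inr ⟨List.mem_cons_of_mem _ hm, hg⟩
      · rintro (hx | ⟨hm, hg1, hg2⟩)
        · exact Or.inl hx
        · rcases List.mem_cons.1 hm with rfl | hm
          · exact absurd hg1 h1
          · exact Or.inr ⟨hm, hg1, hg2⟩

lemma nodup_foldl_guard_add {α : Type} [BEq α] [LawfulBEq α] (g1 g2 : α → Bool)
    (l : List α) (s : PySem.Set α) (h : s.Nodup) :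
    (l.foldl (fun s y => if g1 y then (if g2 y then PySem.Set.add s y else s) else s) s).Nodup := by
  induction l generalizing s with
  | nil => exact h
  | cons y t ih =>
    rw [List.foldl_cons]
    split_ifs <;> [exact ih _ (PySem.Set.nodup_add _ _ h); exact ih _ h; exact ih _ h]

-- the set A builds
def pvLA (modules : List String) (main_module : String) : PySem.Set String :=
  (modules.flatMap (fun m => (PySem.List.pyRange 2 ((pvParts m).length : Int)).map
      (fun i => pvPref m (i + 1)))).foldl
    (fun s y => if ((y != main_module) && !(modules.contains y)) then
        (if decide ((modules.filter
              (fun m => PySem.Str.startswith m (y ++ "."))).length > 1) = true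
         then PySem.Set.add s y else s) else s) PySem.Set.empty

lemma A_sorted (modules : List String) (main_module : String) :
    find_container_modules modules main_module
      = PySem.List.sorted (pvLA modules main_module) (fun x => x) := by
  unfold find_container_modules pvLA
  dsimp only
  congr 1
  rw [List.foldl_flatMap]
  apply PySem.List.foldl_congr_mem
  intro acc m _
  show (if (pvParts m).length > 2 then _ else acc) = _
  rw [List.foldl_map]
  simp only [decide_eq_true_eq]
  split_ifs with h
  · rfl
  · rw [PySem.List.pyRange_one_eq_nil (by omega), List.foldl_nil]

lemma A_nodup (modules : List String) (main_module : String) :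
    (pvLA modules main_module).Nodup :=
  nodup_foldl_guard_add _ _ _ _ List.nodup_nil

lemma A_mem (modules : List String) (main_module : String) (x : String) :
    x ∈ pvLA modules main_module
      ↔ x ∈ modules.flatMap pvCand ∧ pvGood modules main_module x = true := by
  unfold pvLA
  rw [mem_foldl_guard_add]
  simp only [List.mem_flatMap, mem_candA_iff]
  unfold pvGood
  constructor
  · rintro (hx | ⟨⟨m, hm, hc⟩, hg1, hg2⟩)
    · simp at hx
    · exact ⟨⟨m, hm, hc⟩, by rw [hg1, hg2, Bool.true_and]⟩
  · rintro ⟨⟨m, hm, hc⟩, hg⟩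
    rw [Bool.and_eq_true] at hg
    exact Or.inr ⟨⟨m, hm, hc⟩, hg.1, hg.2⟩

-- the dict and the candidate set B builds
def pvCnt (modules : List String) : PySem.Dict String Int :=
  (modules.flatMap pvPrefL).foldl (fun d x => d.insert x (d.getD x 0 + 1)) PySem.Dict.empty

def pvCands (modules : List String) : PySem.Set String :=
  PySem.Set.ofList (modules.flatMap pvCand)

def pvSt (modules : List String) : PySem.Dict String Int × PySem.Set String :=
  modules.foldl (fun (st : PySem.Dict String Int × PySem.Set String) m =>
      let parts := (PySem.Str.split? m ".").getD []
      ((PySem.List.pyRange 1 (parts.length : Int)).foldl (fun d k =>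
          let p := PySem.Str.join "." (PySem.List.slice parts none (some k))
          d.insert p (d.getD p 0 + 1)) st.1,
       (PySem.List.pyRange 3 ((parts.length : Int) + 1)).foldl (fun c k =>
          c.add (PySem.Str.join "." (PySem.List.slice parts none (some k)))) st.2))
    (PySem.Dict.empty, PySem.Set.empty)

lemma B_split (modules : List String) (main_module : String) :
    find_container_modules_alt modules main_module
      = PySem.List.sorted ((pvSt modules).2.filter (fun p =>
          (p != main_module) && !((PySem.Set.ofList modules).contains p)
            && ((pvSt modules).1.getD p 0 > 1))) (fun x => x) := rfl

lemma pvSt_eq (modules : List String) :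
    pvSt modules = (pvCnt modules, pvCands modules) := by
  unfold pvSt
  show List.foldl (fun (st : PySem.Dict String Int × PySem.Set String) m =>
      ((fun (d0 : PySem.Dict String Int) m => (PySem.List.pyRange 1 (((PySem.Str.split? m ".").getD []).length : Int)).foldl
          (fun d k =>
            d.insert (PySem.Str.join "." (PySem.List.slice ((PySem.Str.split? m ".").getD []) none (some k)))
              ((d.getD (PySem.Str.join "." (PySem.List.slice ((PySem.Str.split? m ".").getD []) none (some k))) 0) + 1)) d0) st.1 m,
       (fun (c0 : PySem.Set String) m => (PySem.List.pyRange 3 ((((PySem.Str.split? m ".").getD []).length : Int) + 1)).foldl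
          (fun c k => c.add (PySem.Str.join "." (PySem.List.slice ((PySem.Str.split? m ".").getD []) none (some k)))) c0) st.2 m))
    (PySem.Dict.empty, PySem.Set.empty) modules = (pvCnt modules, pvCands modules)
  refine Eq.trans (PySem.List.foldl_prod_mk
    (fun (d0 : PySem.Dict String Int) m => (PySem.List.pyRange 1 (((PySem.Str.split? m ".").getD []).length : Int)).foldl
        (fun d k =>
          d.insert (PySem.Str.join "." (PySem.List.slice ((PySem.Str.split? m ".").getD []) none (some k)))
            ((d.getD (PySem.Str.join "." (PySem.List.slice ((PySem.Str.split? m ".").getD []) none (some k))) 0) + 1)) d0)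
    (fun (c0 : PySem.Set String) m => (PySem.List.pyRange 3 ((((PySem.Str.split? m ".").getD []).length : Int) + 1)).foldl
        (fun c k => c.add (PySem.Str.join "." (PySem.List.slice ((PySem.Str.split? m ".").getD []) none (some k)))) c0)
    modules PySem.Dict.empty PySem.Set.empty) ?_
  have h1 : modules.foldl (fun d m =>
      (PySem.List.pyRange 1 (((PySem.Str.split? m ".").getD []).length : Int)).foldl
        (fun d k =>
          d.insert (PySem.Str.join "." (PySem.List.slice ((PySem.Str.split? m ".").getD []) none (some k)))
            ((d.getD (PySem.Str.join "." (PySem.List.slice ((PySem.Str.split? m ".").getD []) none (some k))) 0) + 1)) d)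
      PySem.Dict.empty = pvCnt modules := by
    unfold pvCnt
    rw [List.foldl_flatMap]
    apply PySem.List.foldl_congr_mem
    intro acc m _
    rw [pvPrefL, List.foldl_map]
    rfl
  have h2 : modules.foldl (fun c m =>
      (PySem.List.pyRange 3 ((((PySem.Str.split? m ".").getD []).length : Int) + 1)).foldl
        (fun c k => c.add (PySem.Str.join "." (PySem.List.slice ((PySem.Str.split? m ".").getD []) none (some k)))) c)
      PySem.Set.empty = pvCands modules := by
    unfold pvCands
    rw [PySem.Set.ofList_eq_foldl, List.foldl_flatMap]
    apply PySem.List.foldl_congr_mem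
    intro acc m _
    rw [pvCand, List.foldl_map]
    rfl
  rw [h1, h2]

lemma B_sorted (modules : List String) (main_module : String) :
    find_container_modules_alt modules main_module
      = PySem.List.sorted ((pvCands modules).filter (fun p =>
          (p != main_module) && !((PySem.Set.ofList modules).contains p)
            && ((pvCnt modules).getD p 0 > 1))) (fun x => x) := by
  rw [B_split, pvSt_eq]

-- B's filter accepts exactly the prefixes A's test accepts
lemma B_pred_eq (modules : List String) (main_module : String) (p : String) :
    ((p != main_module) && !((PySem.Set.ofList modules).contains p)
        && ((pvCnt modules).getD p 0 > 1))
      = pvGood modules main_module p := by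
  unfold pvGood
  have hc : PySem.Set.contains (PySem.Set.ofList modules) p = modules.contains p := by
    rw [Bool.eq_iff_iff]
    simp [PySem.Set.contains, PySem.Set.mem_ofList]
  have hcnt : (pvCnt modules).getD p 0
      = ((modules.filter (fun m => PySem.Str.startswith m (p ++ "."))).length : Int) := by
    unfold pvCnt
    rw [PySem.Dict.getD_foldl_insert_add_one, PySem.Dict.getD_empty, count_flatMap_prefL]
    ring
  rw [hc, hcnt]
  congr 1
  rw [Bool.eq_iff_iff]
  simp only [decide_eq_true_eq]
  exact_mod_cast Iff.rfl

lemma B_mem (modules : List String) (main_module : String) (x : String) :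
    x ∈ (pvCands modules).filter (fun p =>
        (p != main_module) && !((PySem.Set.ofList modules).contains p)
          && ((pvCnt modules).getD p 0 > 1))
      ↔ x ∈ modules.flatMap pvCand ∧ pvGood modules main_module x = true := by
  rw [List.mem_filter, B_pred_eq]
  unfold pvCands
  rw [PySem.Set.mem_ofList]

lemma B_nodup (modules : List String) (main_module : String) :
    ((pvCands modules).filter (fun p =>
        (p != main_module) && !((PySem.Set.ofList modules).contains p)
          && ((pvCnt modules).getD p 0 > 1))).Nodup :=
  List.Nodup.filter _ (PySem.Set.nodup_ofList _)

-- ===== VERDICT (by name: the statement is the Claim_ definition above) =====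
theorem find_container_modules_spec : Claim_equal_find_container_modules := by
  intro modules main_module _hdom
  unfold Spec_find_container_modules
  rw [A_sorted, B_sorted]
  exact PySem.List.sorted_eq_sorted_of_perm _ _ _ (fun a b h => h)
    ((List.perm_ext_iff_of_nodup (A_nodup modules main_module) (B_nodup modules main_module)).2
      (fun a => by rw [A_mem, B_mem modules main_module a]))
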